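-- pv_equiv track=rewrite | github.com/pypi-data/pypi-mirror-227 | packages/game-base/game_base-0.0.2.tar.gz/game_base-0.0.2/game_base/base/game/base/logic/poker_card_utils.py | find_same_value
-- ===== SOURCE A (Python) =====
-- def get_card_value(card):
--     r"""
--      获取牌的值
--     :param card:牌
--     :return:
--     """
--     return card % 100
--
-- def find_same_value(cards, count):
--     r"""
--     :是否有相同值的牌
--     :param cards: 所有牌
--     :param count: 要找的个数 > 1
--     :return bool
--     """
--     _values = []
--     for _card in cards:
--         _values.append(get_card_value(_card))
--     _values = sorted(_values)
--     for i in range(len(cards) - count):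
--         if _values[i] == _values[i + count]:
--             return _values[i:i + count]
--     return None
-- ===== SOURCE B (Python) =====
-- def find_same_value(cards, count):
--     values = sorted(c % 100 for c in cards)
--     run = 0
--     prev = None
--     for v in values:
--         run = run + 1 if (prev is not None and v == prev) else 1
--         prev = v
--         if run == count + 1:
--             return [v] * count
--     return None
-- ===== Notes on version B (the rewrite author's own statement) =====
-- stated objective: simpler
-- what changed: Replaces A's offset-window index scan (values[i] == values[i+count] over range(len-count)) with a single run-length pass over the sorted values that returns when a run of equal values reaches count+1, building the result with [v]*count instead of slicing.
-- outside the precondition, e.g. on find_same_value([1, 1], -1): A returns [1], B returns None; on find_same_value([1, 2], -1): A raises IndexError, B returns None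
import Mathlib
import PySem

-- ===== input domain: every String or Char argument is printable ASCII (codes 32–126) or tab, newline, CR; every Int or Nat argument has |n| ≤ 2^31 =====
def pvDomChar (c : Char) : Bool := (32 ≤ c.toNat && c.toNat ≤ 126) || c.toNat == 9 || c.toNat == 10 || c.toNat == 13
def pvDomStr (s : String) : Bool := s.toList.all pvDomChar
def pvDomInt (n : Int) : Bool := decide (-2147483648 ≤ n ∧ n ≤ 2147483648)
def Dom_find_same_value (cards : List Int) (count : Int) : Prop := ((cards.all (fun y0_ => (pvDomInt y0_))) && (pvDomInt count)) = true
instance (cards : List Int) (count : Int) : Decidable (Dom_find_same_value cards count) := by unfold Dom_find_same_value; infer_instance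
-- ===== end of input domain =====

-- B replaces A's offset-window index scan over the sorted values by a single run-length pass (simpler decomposition, same cost).


-- ===== PORT A =====
def get_card_value (card : Int) : Int := PySem.Int.mod card 100

-- 'for i in range(len(cards) - count): if _values[i] == _values[i + count]: return _values[i:i + count]'
def findLoopA (values : List Int) (count : Int) : List Int → Option (List Int)
  | [] => none
  | i :: rest =>
    match PySem.List.pyGet? values i, PySem.List.pyGet? values (i + count) with
    | some a, some b =>
        if a = b then some (PySem.List.slice values (some i) (some (i + count)))
        else findLoopA values count rest
    | _, _ => none   -- IndexError (only reachable outside Pre_)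

def find_same_value (cards : List Int) (count : Int) : Option (List Int) :=
  let values := cards.foldl (fun acc c => acc ++ [get_card_value c]) []
  let values := PySem.List.sorted values (fun x => x) false
  findLoopA values count (PySem.List.pyRange 0 (PySem.List.len cards - count) 1)

-- ===== PORT B =====
-- 'run = run + 1 if (prev is not None and v == prev) else 1; … ; if run == count + 1: return [v] * count'
def runLoopB (count : Int) : List Int → Int → Option Int → Option (List Int)
  | [], _, _ => none
  | v :: rest, run, prev =>
    let run' := match prev with
      | some p => if v = p then run + 1 else 1
      | none => 1
    if run' = count + 1 then some (List.replicate count.toNat v)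
    else runLoopB count rest run' (some v)

def find_same_value_alt (cards : List Int) (count : Int) : Option (List Int) :=
  let values := PySem.List.sorted (cards.map (fun c => PySem.Int.mod c 100)) (fun x => x) false
  runLoopB count values 0 none

-- ===== PRECONDITION & SPEC =====
-- Pre_ excludes negative count (the docstring requires count > 1): there A either raises IndexError or
-- returns an accidental slice via Python's negative-index wraparound; B returns None.
def Pre_find_same_value (cards : List Int) (count : Int) : Prop := 0 ≤ count
instance (cards : List Int) (count : Int) : Decidable (Pre_find_same_value cards count) := by unfold Pre_find_same_value; infer_instance

def pvWitness_find_same_value : List Int × Int := ([101, 1, 203, 3], 1)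

def Spec_find_same_value (cards : List Int) (count : Int) (out : Option (List Int)) : Prop := out = find_same_value_alt cards count
instance (cards : List Int) (count : Int) (out : Option (List Int)) : Decidable (Spec_find_same_value cards count out) := by unfold Spec_find_same_value; infer_instance

-- ===== CLAIM (what is proved, stated in full; the proofs are below) =====
def Claim_equal_find_same_value : Prop := ∀ (cards : List Int) (count : Int), Dom_find_same_value cards count → Pre_find_same_value cards count → Spec_find_same_value cards count (find_same_value cards count)

-- ===== LEMMAS AND PROOFS =====

-- Common reference form of both scans: first window of k+1 equal consecutive elements.
def wscan (k : Nat) (l : List Int) : Option (List Int) :=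
  if h : l.length ≤ k then none
  else if l[k]'(by omega) = l[0]'(by omega) then some (l.take k)
  else wscan k l.tail
termination_by l.length
decreasing_by simp; omega

theorem wscan_of_short {k : Nat} {l : List Int} (h : l.length ≤ k) : wscan k l = none := by
  rw [wscan]; simp [h]

-- A's index loop over range(j, len-k) equals wscan on the suffix from j.
theorem lemA (vs : List Int) (k : Nat) : ∀ (j : Nat),
    findLoopA vs (k : Int) (PySem.List.pyRange (j : Int) ((vs.length : Int) - (k : Int)) 1)
      = wscan k (vs.drop j) := by
  intro j
  by_cases hj : vs.length ≤ j + k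
  · rw [PySem.List.pyRange_one_eq_nil (by omega)]
    rw [wscan_of_short (by simp; omega)]
    rfl
  · rw [PySem.List.pyRange_one_cons (by omega)]
    have hjlt : j < vs.length := by omega
    have hjk : j + k < vs.length := by omega
    rw [findLoopA]
    have h1 : PySem.List.pyGet? vs (j : Int) = some vs[j] := by
      simp [PySem.List.pyGet?_natCast, List.getElem?_eq_getElem hjlt]
    have h2 : PySem.List.pyGet? vs ((j : Int) + (k : Int)) = some vs[j + k] := by
      have : (j : Int) + (k : Int) = ((j + k : Nat) : Int) := by push_cast; ring
      rw [this, PySem.List.pyGet?_natCast, List.getElem?_eq_getElem hjk]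
    rw [h1, h2]
    simp only []
    rw [wscan]
    have hlen : ¬ ((vs.drop j).length ≤ k) := by rw [List.length_drop]; omega
    have hget0 : (vs.drop j)[0]'(by rw [List.length_drop]; omega) = vs[j] := by
      simp [List.getElem_drop]
    have hgetk : (vs.drop j)[k]'(by rw [List.length_drop]; omega) = vs[j + k] := by
      rw [List.getElem_drop]
    rw [dif_neg hlen, hget0, hgetk]
    by_cases heq : vs[j] = vs[j + k]
    · rw [if_pos heq, if_pos heq.symm]
      have hcast : (j : Int) + (k : Int) = ((j + k : Nat) : Int) := by push_cast; ring
      rw [hcast, PySem.List.slice_natCast]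
      have hkk : j + k - j = k := by omega
      rw [hkk]
    · rw [if_neg heq, if_neg (fun h => heq h.symm)]
      have : (j : Int) + 1 = ((j + 1 : Nat) : Int) := by push_cast; ring
      rw [this, lemA vs k (j + 1)]
      congr 1
      rw [List.tail_drop]
termination_by j => vs.length - j
decreasing_by omega

-- Windows starting inside a run of p followed only by larger elements all fail.
theorem wskip (k : Nat) (l' : List Int) (p : Int) (hgt : ∀ x ∈ l', p < x) :
    ∀ (m : Nat), m ≤ k → wscan k (List.replicate m p ++ l') = wscan k l' := by
  intro m
  induction m with
  | zero => intro _; simp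
  | succ n ih =>
    intro hm
    by_cases hlen : (List.replicate (n + 1) p ++ l').length ≤ k
    · rw [wscan_of_short hlen, wscan_of_short (by simp at hlen ⊢; omega)]
    · rw [wscan, dif_neg hlen]
      have hk1 : n + 1 ≤ k := hm
      have hlk : k < (List.replicate (n + 1) p ++ l').length := by omega
      have hl'len : k - (n + 1) < l'.length := by simp at hlk; omega
      have hgetk : (List.replicate (n + 1) p ++ l')[k]'(by omega) = l'[k - (n + 1)] := by
        rw [List.getElem_append_right (by simp; omega)]
        simp
      have hget0 : (List.replicate (n + 1) p ++ l')[0]'(by omega) = p := by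
        rw [List.getElem_append_left (by simp)]
        simp
      rw [hgetk, hget0]
      have hne : ¬ (l'[k - (n + 1)] = p) := by
        have := hgt _ (List.getElem_mem hl'len)
        omega
      rw [if_neg hne]
      have htail : (List.replicate (n + 1) p ++ l').tail = List.replicate n p ++ l' := by
        simp [List.replicate_succ]
      rw [htail, ih (by omega)]

-- B's run-length loop, from state (run, p) with the run as sorted prefix, equals wscan.
theorem lemInv (k : Nat) : ∀ (l : List Int) (run : Nat) (p : Int),
    1 ≤ run → run ≤ k → (List.replicate run p ++ l).Pairwise (· ≤ ·) →
    runLoopB (k : Int) l (run : Int) (some p) = wscan k (List.replicate run p ++ l) := by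
  intro l
  induction l with
  | nil =>
    intro run p h1 hk _
    rw [wscan_of_short (by simp; omega)]
    rfl
  | cons v rest ih =>
    intro run p h1 hk hpw
    rw [runLoopB]
    by_cases hpv : v = p
    · subst hpv
      have hlist : List.replicate run v ++ v :: rest = List.replicate (run + 1) v ++ rest := by
        rw [List.replicate_succ']
        simp
      simp only [if_true]
      by_cases hrun : run = k
      · rw [if_pos (by rw [hrun])]
        rw [hrun] at hlist
        rw [hrun, hlist, wscan]
        have hlen : ¬ ((List.replicate (k + 1) v ++ rest).length ≤ k) := by simp; omega
        rw [dif_neg hlen]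
        have hgetk : (List.replicate (k + 1) v ++ rest)[k]'(by omega) = v := by
          rw [List.getElem_append_left (by simp)]
          simp
        have hget0 : (List.replicate (k + 1) v ++ rest)[0]'(by omega) = v := by
          rw [List.getElem_append_left (by simp)]
          simp
        rw [hgetk, hget0, if_pos rfl]
        congr 1
        rw [List.take_append_of_le_length (by simp)]
        simp
      · rw [if_neg (by intro h; apply hrun; omega)]
        have : (run : Int) + 1 = ((run + 1 : Nat) : Int) := by push_cast; ring
        rw [this, ih (run + 1) v (by omega) (by omega) (by rw [← hlist]; exact hpw), hlist]
    · rw [if_neg hpv]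
      rw [if_neg (by intro h; omega)]
      have hpw' : (v :: rest).Pairwise (· ≤ ·) :=
        (List.pairwise_append.mp hpw).2.1
      have hple : ∀ x ∈ v :: rest, p ≤ x := by
        intro x hx
        exact (List.pairwise_append.mp hpw).2.2 p (by simp [List.mem_replicate]; omega) x hx
      have hplt : ∀ x ∈ v :: rest, p < x := by
        intro x hx
        rcases List.mem_cons.mp hx with h | h
        · subst h; exact lt_of_le_of_ne (hple x hx) (fun h => hpv h.symm)
        · have hvle : v ≤ x := List.rel_of_pairwise_cons hpw' h
          have := hple v (by simp)
          have hpvlt : p < v := lt_of_le_of_ne this (fun h => hpv h.symm)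
          omega
      have h1' : ((1 : Nat) : Int) = (1 : Int) := by norm_num
      rw [← h1', ih 1 v (by omega) (by omega) (by simpa using hpw')]
      rw [wskip k (v :: rest) p hplt run hk]
      simp

theorem lemB (k : Nat) (l : List Int) (hpw : l.Pairwise (· ≤ ·)) :
    runLoopB (k : Int) l 0 none = wscan k l := by
  cases l with
  | nil => rw [wscan_of_short (by simp)]; rfl
  | cons v rest =>
    rw [runLoopB]
    by_cases hk : k = 0
    · subst hk
      rw [if_pos (by norm_num)]
      rw [wscan]
      have hlen : ¬ ((v :: rest).length ≤ 0) := by simp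
      rw [dif_neg hlen, if_pos rfl]
      simp
    · rw [if_neg (by intro h; omega)]
      have h1' : ((1 : Nat) : Int) = (1 : Int) := by norm_num
      rw [← h1', lemInv k rest 1 v (by omega) (by omega) (by simpa using hpw)]
      simp

-- ===== VERDICT (by name: the statement is the Claim_ definition above) =====
theorem lemA0 (vs : List Int) (k : Nat) :
    findLoopA vs (k : Int) (PySem.List.pyRange 0 ((vs.length : Int) - (k : Int)) 1) = wscan k vs := by
  have h := lemA vs k 0
  simpa using h

theorem find_same_value_spec : Claim_equal_find_same_value := by
  intro cards count _ hpre
  unfold Pre_find_same_value at hpre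
  unfold Spec_find_same_value find_same_value find_same_value_alt
  show findLoopA (PySem.List.sorted (cards.foldl (fun acc c => acc ++ [get_card_value c]) []) (fun x => x) false)
        count (PySem.List.pyRange 0 (PySem.List.len cards - count) 1)
      = runLoopB count (PySem.List.sorted (cards.map (fun c => PySem.Int.mod c 100)) (fun x => x) false) 0 none
  rw [PySem.List.foldl_append_singleton_eq_map, List.nil_append]
  have hmapeq : cards.map (fun c => PySem.Int.mod c 100) = cards.map get_card_value := rfl
  rw [hmapeq]
  set vs := PySem.List.sorted (cards.map get_card_value) (fun x => x) false with hvs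
  have hk : count = ((count.toNat : Nat) : Int) := by omega
  have hlen : PySem.List.len cards = (vs.length : Int) := by
    simp [hvs, PySem.List.len_eq, PySem.List.length_sorted]
  have hpw : vs.Pairwise (· ≤ ·) := by
    have := PySem.List.sorted_pairwise (cards.map get_card_value) (fun x => x)
    simpa using this
  rw [hlen, hk, lemA0 vs count.toNat, lemB count.toNat vs hpw]
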